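-- pv_equiv track=rewrite | github.com/JahMeat/Tic-Tac-Toe-Bot | jah0311_eugeneus1_KInARow.py | sequence_eval
-- ===== SOURCE A (Python) =====
-- def sequence_eval(sequence, win_length):
--     score = 0
--     n = len(sequence)
--
--     for i in range(n - win_length + 1):
--         window = sequence[i:i+win_length]
--         if "-" in window:
--             continue
--         x_count = window.count("X")
--         o_count = window.count("O")
--
--         if x_count == win_length:
--             return 10 ** win_length
--         elif o_count == win_length:
--             return -10 ** win_length
--
--         if x_count > 0 and o_count == 0:
--             score += 10 ** (x_count - 1)
--         elif o_count > 0 and x_count == 0: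
--             score -= 10 ** (o_count - 1)
--     return score
-- ===== SOURCE B (Python) =====
-- def sequence_eval(sequence, win_length):
--     n = len(sequence)
--     if win_length > n:
--         return 0
--     # counts of the current window, maintained incrementally (O(n) instead of O(n*w))
--     x = o = d = 0
--     for c in sequence[:win_length]:
--         if c == 'X':
--             x += 1
--         elif c == 'O':
--             o += 1
--         elif c == '-':
--             d += 1
--     score = 0
--     for i in range(n - win_length + 1):
--         if i > 0:
--             # slide the window: drop sequence[i-1], take in sequence[i+win_length-1]
--             out = sequence[i - 1]
--             inc = sequence[i + win_length - 1]
--             if out == 'X':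
--                 x -= 1
--             elif out == 'O':
--                 o -= 1
--             elif out == '-':
--                 d -= 1
--             if inc == 'X':
--                 x += 1
--             elif inc == 'O':
--                 o += 1
--             elif inc == '-':
--                 d += 1
--         if d == 0:
--             if x == win_length:
--                 return 10 ** win_length
--             if o == win_length:
--                 return -10 ** win_length
--             if x > 0 and o == 0:
--                 score += 10 ** (x - 1)
--             elif o > 0 and x == 0:
--                 score -= 10 ** (o - 1)
--     return score
-- ===== Notes on version B (the rewrite author's own statement) =====
-- stated objective: faster
-- what changed: A re-slices and re-counts each length-w window from scratch; B keeps running X/O/dash counts and updates them in O(1) per shift (sliding window), scanning the string once.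
-- outside the precondition, e.g. on sequence_eval('XX', -1): A returns 1, B raises IndexError; on sequence_eval('XOXOX', -3): A returns 0, B raises IndexError
import Mathlib
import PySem

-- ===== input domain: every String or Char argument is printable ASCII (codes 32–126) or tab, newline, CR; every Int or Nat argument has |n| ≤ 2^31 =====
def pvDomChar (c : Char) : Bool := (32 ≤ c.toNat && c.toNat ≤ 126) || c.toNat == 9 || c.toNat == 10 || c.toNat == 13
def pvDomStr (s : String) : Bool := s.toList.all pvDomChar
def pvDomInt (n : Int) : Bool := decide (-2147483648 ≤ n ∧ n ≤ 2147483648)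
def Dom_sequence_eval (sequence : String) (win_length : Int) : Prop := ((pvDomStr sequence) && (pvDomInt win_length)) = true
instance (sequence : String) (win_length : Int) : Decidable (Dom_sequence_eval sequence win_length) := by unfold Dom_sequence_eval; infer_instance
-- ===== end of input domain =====

-- B replaces A's per-window slicing and counting (O(n·w)) by a sliding window with
-- incrementally maintained X/O/dash counts (O(n)); return values are identical on Pre_.

-- ===== PORT A =====
-- A's for-loop over range(n - win_length + 1); the early `return`s are the non-recursive branches.
def seqevalA_loop (s : List Char) (w : Int) : List Int → Int → Int
  | [], score => score
  | i :: is, score =>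
    let window := PySem.List.slice s (some i) (some (i + w))
    if PySem.Chars.isIn ['-'] window then seqevalA_loop s w is score
    else
      let x_count : Int := (PySem.Chars.count window ['X'] : Int)
      let o_count : Int := (PySem.Chars.count window ['O'] : Int)
      if x_count == w then 10 ^ w.toNat            -- 10 ** win_length, exact for win_length ≥ 0 (Pre_)
      else if o_count == w then -(10 ^ w.toNat)
      else if x_count > 0 && o_count == 0 then seqevalA_loop s w is (score + 10 ^ (x_count - 1).toNat)
      else if o_count > 0 && x_count == 0 then seqevalA_loop s w is (score - 10 ^ (o_count - 1).toNat)
      else seqevalA_loop s w is score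

def sequence_eval (sequence : String) (win_length : Int) : Int :=
  let s := sequence.toList
  let n : Int := s.length
  seqevalA_loop s win_length (PySem.List.pyRange 0 (n - win_length + 1) 1) 0

-- ===== PORT B =====
-- state (x, o, d): counts of 'X', 'O', '-' in the current window
def seqevalB_sub (c : Char) (t : Int × Int × Int) : Int × Int × Int :=
  if c == 'X' then (t.1 - 1, t.2.1, t.2.2)
  else if c == 'O' then (t.1, t.2.1 - 1, t.2.2)
  else if c == '-' then (t.1, t.2.1, t.2.2 - 1)
  else t

def seqevalB_add (c : Char) (t : Int × Int × Int) : Int × Int × Int :=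
  if c == 'X' then (t.1 + 1, t.2.1, t.2.2)
  else if c == 'O' then (t.1, t.2.1 + 1, t.2.2)
  else if c == '-' then (t.1, t.2.1, t.2.2 + 1)
  else t

-- the first loop of Source B: count the initial window
def seqevalB_init (cs : List Char) : Int × Int × Int :=
  cs.foldl (fun t c => seqevalB_add c t) (0, 0, 0)

-- Source B's main loop; the two indexings are in range for every loop index i when 0 ≤ win_length ≤ n (Pre_),
-- so pyGetD with a dummy default is exact there
def seqevalB_loop (s : List Char) (w : Int) : List Int → Int × Int × Int → Int → Int
  | [], _, score => score
  | i :: is, t, score =>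
    let t := if i > 0 then
        seqevalB_add (PySem.List.pyGetD s (i + w - 1) ' ')
          (seqevalB_sub (PySem.List.pyGetD s (i - 1) ' ') t)
      else t
    if t.2.2 == 0 then
      if t.1 == w then 10 ^ w.toNat
      else if t.2.1 == w then -(10 ^ w.toNat)
      else if t.1 > 0 && t.2.1 == 0 then seqevalB_loop s w is t (score + 10 ^ (t.1 - 1).toNat)
      else if t.2.1 > 0 && t.1 == 0 then seqevalB_loop s w is t (score - 10 ^ (t.2.1 - 1).toNat)
      else seqevalB_loop s w is t score
    else seqevalB_loop s w is t score

def sequence_eval_alt (sequence : String) (win_length : Int) : Int :=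
  let s := sequence.toList
  let n : Int := s.length
  if win_length > n then 0
  else
    let t := seqevalB_init (PySem.List.slice s none (some win_length))
    seqevalB_loop s win_length (PySem.List.pyRange 0 (n - win_length + 1) 1) t 0

-- ===== PRECONDITION & SPEC =====
-- Pre_ excludes negative win_length: outside the natural domain of a window length; there A still
-- returns a score built from accidental negative-slice windows while B's sliding indices raise IndexError.
def Pre_sequence_eval (sequence : String) (win_length : Int) : Prop := 0 ≤ win_length
instance (sequence : String) (win_length : Int) : Decidable (Pre_sequence_eval sequence win_length) := by unfold Pre_sequence_eval; infer_instance

def pvWitness_sequence_eval : String × Int := ("XX-OXO", 2)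

def Spec_sequence_eval (sequence : String) (win_length : Int) (out : Int) : Prop := out = sequence_eval_alt sequence win_length
instance (sequence : String) (win_length : Int) (out : Int) : Decidable (Spec_sequence_eval sequence win_length out) := by unfold Spec_sequence_eval; infer_instance

-- ===== CLAIM (what is proved, stated in full; the proofs are below) =====
def Claim_equal_sequence_eval : Prop := ∀ (sequence : String) (win_length : Int), Dom_sequence_eval sequence win_length → Pre_sequence_eval sequence win_length → Spec_sequence_eval sequence win_length (sequence_eval sequence win_length)

-- ===== LEMMAS AND PROOFS =====

-- the window starting at j
def sv_win (s : List Char) (w j : Nat) : List Char := (s.drop j).take w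

-- its (X, O, -) counts, as B's Int state
def sv_counts (W : List Char) : Int × Int × Int := ((W.count 'X' : Int), ((W.count 'O' : Int), (W.count '-' : Int)))

lemma sv_count_go (c : Char) : ∀ (l : List Char) (fuel acc : Nat), l.length ≤ fuel →
    PySem.Chars.count.go [c] fuel l acc = acc + l.count c := by
  intro l
  induction l with
  | nil => intro fuel acc _; cases fuel <;> simp [PySem.Chars.count.go]
  | cons h t ih =>
    intro fuel acc hf
    cases fuel with
    | zero => simp at hf
    | succ f =>
      by_cases hc : h = c
      · simp only [PySem.Chars.count.go, hc, List.isPrefixOf]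
        simp [ih f (acc + 1) (by simpa using hf)]
        omega
      · simp only [PySem.Chars.count.go]
        rw [if_neg (by simp [List.isPrefixOf, Ne.symm hc])]
        simp [ih f acc (by simpa using hf), List.count_cons, hc]

lemma sv_count_singleton (cs : List Char) (c : Char) :
    PySem.Chars.count cs [c] = cs.count c := by
  simp [PySem.Chars.count, sv_count_go c cs cs.length 0 le_rfl]

lemma sv_singleton_infix (c : Char) (cs : List Char) : [c] <:+: cs ↔ c ∈ cs := by
  constructor
  · intro h; exact h.subset (by simp)
  · intro h
    obtain ⟨l, r, rfl⟩ := List.append_of_mem h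
    exact ⟨l, r, by simp⟩

lemma sv_isIn_singleton (c : Char) (cs : List Char) :
    PySem.Chars.isIn [c] cs = cs.contains c := by
  rw [Bool.eq_iff_iff, PySem.Chars.isIn_iff_infix, sv_singleton_infix]
  simp

lemma sv_init (cs : List Char) : ∀ (x o d : Int),
    cs.foldl (fun t c => seqevalB_add c t) (x, o, d)
      = (x + cs.count 'X', (o + cs.count 'O', d + cs.count '-')) := by
  induction cs with
  | nil => intro x o d; simp
  | cons h t ih =>
    intro x o d
    simp only [List.foldl_cons]
    by_cases h1 : h = 'X'
    · rw [show seqevalB_add h (x, o, d) = (x + 1, o, d) from by simp [seqevalB_add, h1], ih]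
      simp [Prod.ext_iff, List.count_cons, h1]
      omega
    · by_cases h2 : h = 'O'
      · rw [show seqevalB_add h (x, o, d) = (x, o + 1, d) from by simp [seqevalB_add, h1, h2], ih]
        simp [Prod.ext_iff, List.count_cons, h1, h2]
        omega
      · by_cases h3 : h = '-'
        · rw [show seqevalB_add h (x, o, d) = (x, o, d + 1) from by simp [seqevalB_add, h1, h2, h3], ih]
          simp [Prod.ext_iff, List.count_cons, h1, h2, h3]
          omega
        · rw [show seqevalB_add h (x, o, d) = (x, o, d) from by simp [seqevalB_add, h1, h2, h3], ih]
          simp [Prod.ext_iff, List.count_cons, h1, h2, h3]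

-- removing the dropped character and adding the new one turns the counts of the old
-- window (a :: M) into the counts of the new window (M ++ [b])
lemma sv_shift (a b : Char) (M : List Char) :
    seqevalB_add b (seqevalB_sub a (sv_counts (a :: M))) = sv_counts (M ++ [b]) := by
  simp only [sv_counts, seqevalB_sub, seqevalB_add, List.count_cons, List.count_append]
  split_ifs <;> simp_all [Prod.ext_iff, List.count_cons] <;> omega

lemma sv_add_sub (c : Char) (t : Int × Int × Int) :
    seqevalB_add c (seqevalB_sub c t) = t := by
  simp only [seqevalB_sub, seqevalB_add]
  split_ifs <;> simp_all [Prod.ext_iff]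

-- the sliding update at loop index j (1 ≤ j, j + w ≤ n) turns the counts of window j-1
-- into the counts of window j
lemma sv_slide (s : List Char) (w j : Nat) (hj : 1 ≤ j) (hjm : j + w ≤ s.length) :
    seqevalB_add (s[j + w - 1]'(by omega))
        (seqevalB_sub (s[j - 1]'(by omega)) (sv_counts (sv_win s w (j - 1))))
      = sv_counts (sv_win s w j) := by
  obtain ⟨j, rfl⟩ : ∃ j', j = j' + 1 := ⟨j - 1, by omega⟩
  cases w with
  | zero =>
    simp only [sv_win, List.take_zero, Nat.add_zero, Nat.add_sub_cancel]
    exact sv_add_sub _ _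
  | succ w =>
    have h1 : j + 1 + (w + 1) - 1 = j + 1 + w := by omega
    have h2 : j + 1 - 1 = j := by omega
    have hwin1 : sv_win s (w + 1) j = s[j]'(by omega) :: (s.drop (j + 1)).take w := by
      rw [sv_win, List.drop_eq_getElem_cons (by omega), List.take_succ_cons]
    have hwin2 : sv_win s (w + 1) (j + 1) = (s.drop (j + 1)).take w ++ [s[j + 1 + w]'(by omega)] := by
      rw [sv_win, List.take_succ, List.getElem?_drop, List.getElem?_eq_getElem (by omega)]
      simp
    simp only [h1, h2, hwin1, hwin2]
    exact sv_shift _ _ _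

-- the two loops agree from any loop index j on, entering with B's state = counts of the
-- previous window (at j = 0, Nat subtraction makes that the initial window itself)
lemma sv_loop_eq (s : List Char) (w : Nat) (hwn : w ≤ s.length) :
    ∀ (k j : Nat) (score : Int), j + k = s.length - w + 1 →
    seqevalB_loop s (w : Int) (PySem.List.pyRange (j : Int) (((s.length - w : Nat) : Int) + 1) 1)
        (sv_counts (sv_win s w (j - 1))) score
      = seqevalA_loop s (w : Int) (PySem.List.pyRange (j : Int) (((s.length - w : Nat) : Int) + 1) 1) score := by
  intro k
  induction k with
  | zero =>
    intro j score hk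
    rw [PySem.List.pyRange_one_eq_nil (by push_cast; omega)]
    rfl
  | succ k ih =>
    intro j score hk
    have hjm : j ≤ s.length - w := by omega
    rw [PySem.List.pyRange_one_cons (by push_cast; omega)]
    -- B's state entering the body of iteration j equals the counts of window j
    have hstate :
        (if (j : Int) > 0 then
            seqevalB_add (PySem.List.pyGetD s ((j : Int) + (w : Int) - 1) ' ')
              (seqevalB_sub (PySem.List.pyGetD s ((j : Int) - 1) ' ') (sv_counts (sv_win s w (j - 1))))
          else sv_counts (sv_win s w (j - 1))) = sv_counts (sv_win s w j) := by
      by_cases hj : 1 ≤ j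
      · rw [if_pos (by exact_mod_cast hj)]
        have e1 : PySem.List.pyGetD s ((j : Int) - 1) ' ' = s[j - 1]'(by omega) := by
          have hcast : ((j : Int) - 1) = ((j - 1 : Nat) : Int) := by push_cast [hj]; ring
          rw [hcast, PySem.List.pyGetD_natCast]
          simp [List.getD_eq_getElem?_getD,
            List.getElem?_eq_getElem (show j - 1 < s.length by omega)]
        have e2 : PySem.List.pyGetD s ((j : Int) + (w : Int) - 1) ' ' = s[j + w - 1]'(by omega) := by
          have hcast : ((j : Int) + (w : Int) - 1) = ((j + w - 1 : Nat) : Int) := by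
            push_cast [show 1 ≤ j + w by omega]; ring
          rw [hcast, PySem.List.pyGetD_natCast]
          simp [List.getD_eq_getElem?_getD,
            List.getElem?_eq_getElem (show j + w - 1 < s.length by omega)]
        rw [e1, e2]
        exact sv_slide s w j hj (by omega)
      · have hj0 : j = 0 := by omega
        subst hj0
        simp
    -- A's window at iteration j
    have hwinA : PySem.List.slice s (some (j : Int)) (some ((j : Int) + (w : Int))) = sv_win s w j := by
      rw [PySem.List.slice_natCast_add]
      rfl
    -- the recursive tail
    have hrec : ∀ sc : Int,
        seqevalB_loop s (w : Int) (PySem.List.pyRange ((j : Int) + 1) (((s.length - w : Nat) : Int) + 1) 1)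
            (sv_counts (sv_win s w j)) sc
          = seqevalA_loop s (w : Int) (PySem.List.pyRange ((j : Int) + 1) (((s.length - w : Nat) : Int) + 1) 1) sc := by
      intro sc
      have := ih (j + 1) sc (by omega)
      simpa [Nat.add_sub_cancel] using this
    simp only [seqevalB_loop, seqevalA_loop, hstate, hwinA,
      sv_isIn_singleton, sv_count_singleton]
    by_cases hd : '-' ∈ sv_win s w j
    · have hc0 : (sv_win s w j).count '-' ≠ 0 := by
        simp [List.count_eq_zero, hd]
      have hb : ¬ ((((sv_win s w j).count '-' : Int) == 0) = true) := by simpa using hc0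
      have ha : ((sv_win s w j).contains '-') = true := by simp [hd]
      simp only [sv_counts]
      rw [if_neg hb, if_pos ha]
      simpa [sv_counts] using hrec score
    · have hc0 : (sv_win s w j).count '-' = 0 := by
        rwa [List.count_eq_zero]
      have hb : ((((sv_win s w j).count '-' : Int) == 0) = true) := by simp [hc0]
      have ha : ¬ (((sv_win s w j).contains '-') = true) := by simp [hd]
      have hrec2 : ∀ sc : Int,
          seqevalB_loop s (w : Int) (PySem.List.pyRange ((j : Int) + 1) (((s.length - w : Nat) : Int) + 1) 1)
              ((((sv_win s w j).count 'X' : Nat) : Int),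
                ((((sv_win s w j).count 'O' : Nat) : Int), (((sv_win s w j).count '-' : Nat) : Int))) sc
            = seqevalA_loop s (w : Int) (PySem.List.pyRange ((j : Int) + 1) (((s.length - w : Nat) : Int) + 1) 1) sc :=
        fun sc => hrec sc
      simp only [sv_counts]
      rw [if_pos hb, if_neg ha]
      simp only [hrec2]
      rfl

-- ===== VERDICT (by name: the statement is the Claim_ definition above) =====
theorem sequence_eval_spec : Claim_equal_sequence_eval := by
  intro sequence win_length _ hpre
  obtain ⟨w, rfl⟩ := Int.eq_ofNat_of_zero_le hpre
  unfold Spec_sequence_eval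
  simp only [sequence_eval, sequence_eval_alt]
  set s := sequence.toList with hs
  by_cases hgt : (w : Int) > (s.length : Int)
  · rw [if_pos hgt, PySem.List.pyRange_one_eq_nil (by omega)]
    rfl
  · have hwn : w ≤ s.length := by exact_mod_cast not_lt.mp hgt
    rw [if_neg hgt]
    have hinit : seqevalB_init (PySem.List.slice s none (some (w : Int)))
        = sv_counts (sv_win s w 0) := by
      rw [PySem.List.slice_to_natCast]
      simp [seqevalB_init, sv_init, sv_counts, sv_win]
    have hrange : (s.length : Int) - (w : Int) + 1 = ((s.length - w : Nat) : Int) + 1 := by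
      push_cast [hwn]
      ring
    rw [hinit, hrange]
    have := sv_loop_eq s w hwn (s.length - w + 1) 0 0 (by omega)
    simpa using this.symm
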